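-- pv_equiv track=rewrite | github.com/olivierdesclaux/PICUPE | XSens/MTwFunctions.py | removeResetCounter
-- ===== SOURCE A (Python) =====
-- def removeResetCounter(packetCounter, maxWrap=65535):
--     """QUICKFIX to remove the reset counter at packet count # 65535
--     Parameters
--     ----------
--     packetCounter : list int
--         List of packet count for the data packets
--     maxWrap : int
--         The number that the packet count reset to 0
--     Returns
--     -------
--      packetCounter : list int
--         List of packet counter without any resets at count # 65535
--     """
--     index = []
--     for i in range(len(packetCounter)):
--         if packetCounter[i] // 10 == 0 and packetCounter[i - 1] // 10 != 0:
--             index.append(i)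
--
--     if index:
--         for n in index:
--             for i in range(n, len(packetCounter)):
--                 packetCounter[i] = packetCounter[i] + maxWrap + 1
--     return packetCounter
-- ===== SOURCE B (Python) =====
-- def removeResetCounter(packetCounter, maxWrap=65535):
--     if not packetCounter:
--         return packetCounter
--     out = []
--     prev = packetCounter[-1]
--     offset = 0
--     for x in packetCounter:
--         if x // 10 == 0 and prev // 10 != 0:
--             offset += maxWrap + 1
--         out.append(x + offset)
--         prev = x
--     packetCounter[:] = out
--     return packetCounter
-- ===== Notes on version B (the rewrite author's own statement) =====
-- stated objective: alternative
-- what changed: A first collects all reset indices and then, for each one, re-walks the tail adding the offset (O(n*k) for k resets); B makes a single pass keeping a running cumulative offset that grows at each reset, touching every element once.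
import Mathlib
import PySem

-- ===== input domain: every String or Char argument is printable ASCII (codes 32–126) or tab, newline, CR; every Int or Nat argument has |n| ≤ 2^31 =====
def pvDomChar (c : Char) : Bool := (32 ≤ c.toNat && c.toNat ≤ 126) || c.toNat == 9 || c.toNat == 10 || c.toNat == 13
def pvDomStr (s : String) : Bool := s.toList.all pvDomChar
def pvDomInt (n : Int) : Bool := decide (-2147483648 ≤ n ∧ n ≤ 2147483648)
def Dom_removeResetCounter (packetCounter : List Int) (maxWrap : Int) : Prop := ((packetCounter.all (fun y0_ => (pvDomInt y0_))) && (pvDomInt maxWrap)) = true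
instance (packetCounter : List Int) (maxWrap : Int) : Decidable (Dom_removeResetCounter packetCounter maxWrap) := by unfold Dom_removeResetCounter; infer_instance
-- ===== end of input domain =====

-- B replaces A's per-reset re-walk of the tail by one pass with a running cumulative offset (objective: alternative).
-- A mutates its argument in place; the equivalence proved here is about the RETURN value only.

-- ===== PORT A =====
-- inner Python loop 'for i in range(n, len(pc)): pc[i] = pc[i] + maxWrap + 1'
-- adds maxWrap+1 to the element at every index ≥ n (exact rendering of the index assignments):
def pvAddFrom (maxWrap : Int) (cur : List Int) (n : Int) : List Int :=
  cur.zipIdx.map (fun p => if n ≤ (p.2 : Int) then p.1 + maxWrap + 1 else p.1)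

def removeResetCounter (packetCounter : List Int) (maxWrap : Int) : List Int :=
  let index : List Int :=
    (PySem.List.pyRange 0 (packetCounter.length : Int) 1).foldl
      (fun acc i =>
        if (PySem.Int.floordiv (PySem.List.pyGetD packetCounter i 0) 10 == 0)
            && (PySem.Int.floordiv (PySem.List.pyGetD packetCounter (i-1) 0) 10 != 0)
        then acc ++ [i] else acc) []
  -- Python's 'if index:' only guards the loop; folding the empty list is already the identity
  index.foldl (pvAddFrom maxWrap) packetCounter

-- ===== PORT B =====
def pvAltGo (maxWrap : Int) : Int → Int → List Int → List Int
  | _, _, [] => []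
  | prev, offset, x :: xs =>
    let offset' := if (PySem.Int.floordiv x 10 == 0) && (PySem.Int.floordiv prev 10 != 0)
                   then offset + maxWrap + 1 else offset
    (x + offset') :: pvAltGo maxWrap x offset' xs

def removeResetCounter_alt (packetCounter : List Int) (maxWrap : Int) : List Int :=
  match packetCounter.getLast? with
  | none => packetCounter
  | some prev => pvAltGo maxWrap prev 0 packetCounter

-- ===== PRECONDITION & SPEC =====
def Spec_removeResetCounter (packetCounter : List Int) (maxWrap : Int) (out : List Int) : Prop := out = removeResetCounter_alt packetCounter maxWrap
instance (packetCounter : List Int) (maxWrap : Int) (out : List Int) : Decidable (Spec_removeResetCounter packetCounter maxWrap out) := by unfold Spec_removeResetCounter; infer_instance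

-- ===== CLAIM (what is proved, stated in full; the proofs are below) =====
def Claim_equal_removeResetCounter : Prop := ∀ (packetCounter : List Int) (maxWrap : Int), Dom_removeResetCounter packetCounter maxWrap → Spec_removeResetCounter packetCounter maxWrap (removeResetCounter packetCounter maxWrap)

-- ===== LEMMAS AND PROOFS =====

-- the reset condition of A, as a Boolean predicate on the (Int) index
def pvCondA (pc : List Int) (i : Int) : Bool :=
  (PySem.Int.floordiv (PySem.List.pyGetD pc i 0) 10 == 0)
    && (PySem.Int.floordiv (PySem.List.pyGetD pc (i-1) 0) 10 != 0)

-- the reset condition seen by B's loop at local index j, with initial previous element prev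
def pvCondB (xs : List Int) (prev : Int) (j : Nat) : Bool :=
  (PySem.Int.floordiv (xs.getD j 0) 10 == 0)
    && (PySem.Int.floordiv (if j = 0 then prev else xs.getD (j-1) 0) 10 != 0)

theorem pvCondB_succ (x : Int) (xs : List Int) (prev : Int) (j : Nat) :
    pvCondB (x :: xs) prev (j+1) = pvCondB xs x j := by
  cases j <;> simp [pvCondB]

theorem pvAltGo_get? (mw : Int) : ∀ (xs : List Int) (prev off : Int) (i : Nat),
    (pvAltGo mw prev off xs)[i]? =
      xs[i]?.map (fun v => v + off + (mw + 1) * (((List.range (i+1)).countP (pvCondB xs prev) : Int))) := by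
  intro xs
  induction xs with
  | nil => intro prev off i; simp [pvAltGo]
  | cons x xs ih =>
    intro prev off i
    cases i with
    | zero =>
      simp only [pvAltGo, List.getElem?_cons_zero, Option.map_some]
      have h0 : pvCondB (x :: xs) prev 0 =
          ((PySem.Int.floordiv x 10 == 0) && (PySem.Int.floordiv prev 10 != 0)) := by
        simp [pvCondB]
      rw [← h0]
      cases hb : pvCondB (x :: xs) prev 0 <;> simp [hb] <;> ring
    | succ i =>
      simp only [pvAltGo, List.getElem?_cons_succ]
      rw [ih]
      have h0 : ((PySem.Int.floordiv x 10 == 0) && (PySem.Int.floordiv prev 10 != 0)) =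
          pvCondB (x :: xs) prev 0 := by
        simp [pvCondB]
      have hsplit : (List.range (i+1+1)).countP (pvCondB (x :: xs) prev) =
          (if pvCondB (x :: xs) prev 0 then 1 else 0) +
            (List.range (i+1)).countP (pvCondB xs x) := by
        rw [List.range_succ_eq_map, List.countP_cons, List.countP_map]
        have hc : (List.range (i+1)).countP (pvCondB (x :: xs) prev ∘ (· + 1)) =
            (List.range (i+1)).countP (pvCondB xs x) := by
          apply List.countP_congr
          intro j hj
          simp [Function.comp, pvCondB_succ]
        rw [hc]
        split <;> omega
      rw [h0, hsplit]
      cases xs[i]? with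
      | none => simp
      | some v =>
        simp only [Option.map_some, Option.some.injEq]
        cases hb : pvCondB (x :: xs) prev 0 <;> simp [hb] <;> (try push_cast) <;> ring

theorem pvAddFrom_get? (mw : Int) (pc : List Int) (a : Int) (i : Nat) :
    (pvAddFrom mw pc a)[i]? = pc[i]?.map (fun v => if a ≤ (i : Int) then v + mw + 1 else v) := by
  simp [pvAddFrom, List.getElem?_zipIdx]
  cases pc[i]? <;> simp

theorem pvFoldAdd_get? (mw : Int) : ∀ (S : List Int) (pc : List Int) (i : Nat),
    (S.foldl (pvAddFrom mw) pc)[i]? =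
      pc[i]?.map (fun v => v + (mw + 1) * ((S.countP (fun n => decide (n ≤ (i : Int))) : Int))) := by
  intro S
  induction S with
  | nil => intro pc i; simp
  | cons a S ih =>
    intro pc i
    rw [List.foldl_cons, ih, pvAddFrom_get?, Option.map_map, List.countP_cons]
    cases pc[i]? with
    | none => simp
    | some v =>
      simp only [Option.map_some, Option.some.injEq, Function.comp]
      by_cases hle : a ≤ (i : Int) <;> simp [hle] <;> push_cast <;> ring

theorem pvCondA_eq (pc : List Int) (prev : Int) (hlast : pc.getLast? = some prev)
    (j : Nat) (hj : j < pc.length) :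
    pvCondA pc (j : Int) = pvCondB pc prev j := by
  have hne : pc ≠ [] := by intro h; rw [h] at hlast; simp at hlast
  cases j with
  | zero =>
    have h2 : pc.getLast hne = prev := by
      rw [List.getLast?_eq_some_getLast hne, Option.some_inj] at hlast
      exact hlast
    unfold pvCondA pvCondB
    norm_num [PySem.List.pyGetD_zero, PySem.List.pyGetD_neg_one pc 0 hne, h2]
  | succ k =>
    have h1 : ((k+1 : Nat) : Int) - 1 = (k : Int) := by push_cast; ring
    have h3 : PySem.List.pyGetD pc ((k : Int) + 1) 0 = pc.getD (k+1) 0 := by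
      rw [show ((k : Int) + 1) = ((k+1 : Nat) : Int) by push_cast; ring,
        PySem.List.pyGetD_natCast]
    unfold pvCondA pvCondB
    rw [h1]
    simp [h3]

theorem pvCount_eq (pc : List Int) (prev : Int) (hlast : pc.getLast? = some prev)
    (i : Nat) (hi : i < pc.length) :
    ((PySem.List.pyRange 0 (pc.length : Int) 1).filter (pvCondA pc)).countP
        (fun n => decide (n ≤ (i : Int)))
      = (List.range (i+1)).countP (pvCondB pc prev) := by
  rw [List.countP_filter, PySem.List.pyRange_one]
  have htn : ((pc.length : Int) - 0).toNat = pc.length := by omega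
  rw [htn, List.countP_map]
  have hlen : pc.length = (i+1) + (pc.length - (i+1)) := by omega
  rw [hlen, List.range_add, List.countP_append]
  have hz : ((List.range (pc.length - (i+1))).map (fun k => (i+1) + k)).countP
      ((fun n => decide (n ≤ (i : Int)) && pvCondA pc n) ∘ (fun k => (0 : Int) + (k : Nat))) = 0 := by
    apply List.countP_eq_zero.mpr
    intro a ha
    simp only [List.mem_map, List.mem_range] at ha
    obtain ⟨k, hk, rfl⟩ := ha
    simp only [Function.comp, Bool.and_eq_true, decide_eq_true_eq]
    intro hcontra
    have := hcontra.1
    omega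
  rw [hz]
  have hc : (List.range (i+1)).countP
      ((fun n => decide (n ≤ (i : Int)) && pvCondA pc n) ∘ (fun k => (0 : Int) + (k : Nat))) =
      (List.range (i+1)).countP (pvCondB pc prev) := by
    apply List.countP_congr
    intro j hj
    simp only [List.mem_range] at hj
    have hle : ((j : Nat) : Int) ≤ (i : Int) := by omega
    simp only [Function.comp, zero_add, hle, decide_true, Bool.true_and]
    rw [pvCondA_eq pc prev hlast j (by omega)]
  rw [hc, Nat.add_zero]

theorem removeResetCounter_spec : Claim_equal_removeResetCounter := by
  intro pc mw _dom
  unfold Spec_removeResetCounter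
  cases hl : pc.getLast? with
  | none =>
    have : pc = [] := List.getLast?_eq_none_iff.mp hl
    subst this
    simp [removeResetCounter, removeResetCounter_alt,
      PySem.List.pyRange_one_eq_nil (by norm_num : (0:Int) ≤ 0)]
  | some prev =>
    have hBside : removeResetCounter_alt pc mw = pvAltGo mw prev 0 pc := by
      simp [removeResetCounter_alt, hl]
    have hidx : (PySem.List.pyRange 0 (pc.length : Int) 1).foldl
        (fun acc i =>
          if (PySem.Int.floordiv (PySem.List.pyGetD pc i 0) 10 == 0)
              && (PySem.Int.floordiv (PySem.List.pyGetD pc (i-1) 0) 10 != 0)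
          then acc ++ [i] else acc) [] =
        (PySem.List.pyRange 0 (pc.length : Int) 1).filter (pvCondA pc) := by
      have := PySem.List.foldl_append_if_eq_filter (pvCondA pc)
        (PySem.List.pyRange 0 (pc.length : Int) 1) []
      simpa [pvCondA] using this
    have hAside : removeResetCounter pc mw =
        ((PySem.List.pyRange 0 (pc.length : Int) 1).filter (pvCondA pc)).foldl
          (pvAddFrom mw) pc := by
      unfold removeResetCounter
      rw [hidx]
    rw [hAside, hBside]
    apply List.ext_getElem?
    intro i
    rw [pvFoldAdd_get?, pvAltGo_get?]
    cases hgi : pc[i]? with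
    | none => simp
    | some v =>
      obtain ⟨hi, -⟩ := List.getElem?_eq_some_iff.mp hgi
      simp only [Option.map_some, Option.some.injEq]
      rw [pvCount_eq pc prev hl i hi]
      ring
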